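-- pv_equiv track=rewrite | github.com/sseongsukim/CodingTest | Review_This_is_coding_test/previous_problems/6.py | solution
-- ===== SOURCE A (Python) =====
-- import heapq
--
-- def solution(food_times, k):
--     if sum(food_times) <= k:
--         return -1
--
--     heap = []
--     for i in range(len(food_times)):
--         heapq.heappush(heap, (food_times[i], i + 1))
--
--     length = len(food_times)
--     previous_time = 0
--
--     while heap:
--         t = (heap[0][0] - previous_time) * length
--         if t <= k:
--             k -= t
--             previous_time, index = heapq.heappop(heap)
--             length -= 1
--         else:
--             index = k % length
--             heap.sort(key= lambda x: x[1])
--             answer = heap[index][1]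
--             return answer
-- ===== SOURCE B (Python) =====
-- def solution(food_times, k):
--     # Binary search on the time value T at which eating stops (no heap, no sorting):
--     # S(T) = sum(min(f, T)) is the number of seconds consumed once every food has been
--     # eaten down to level T.  Find the unique T with S(T-1) <= k < S(T); the foods still
--     # present are those with f >= T, visited in index order, and k - S(T-1) whole bites
--     # into that round-robin pass lands on the answer.
--     if sum(food_times) <= k:
--         return -1
--     n = len(food_times)
--     lo = min(min(food_times), k // n)   # S(lo) <= k
--     hi = max(food_times)                # S(hi) = total > k
--     while hi - lo > 1:
--         mid = (lo + hi) // 2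
--         if sum(min(f, mid) for f in food_times) > k:
--             hi = mid
--         else:
--             lo = mid
--     rest = k - sum(min(f, lo) for f in food_times)   # 0 <= rest < #{f >= hi}
--     survivors = [i + 1 for i, f in enumerate(food_times) if f >= hi]
--     return survivors[rest]
-- ===== Notes on version B (the rewrite author's own statement) =====
-- stated objective: alternative
-- what changed: Replaces the heap simulation that consumes foods one by one with a binary search over integer time values T for the stopping level satisfying S(T-1) <= k < S(T), where S(T) = sum(min(f, T)) is computed by direct counting; the answer is then read from the index-ordered survivors with no sorting or heap at all.
-- outside the precondition, e.g. on solution([], -1): A returns None, B raises ValueError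
import Mathlib
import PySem

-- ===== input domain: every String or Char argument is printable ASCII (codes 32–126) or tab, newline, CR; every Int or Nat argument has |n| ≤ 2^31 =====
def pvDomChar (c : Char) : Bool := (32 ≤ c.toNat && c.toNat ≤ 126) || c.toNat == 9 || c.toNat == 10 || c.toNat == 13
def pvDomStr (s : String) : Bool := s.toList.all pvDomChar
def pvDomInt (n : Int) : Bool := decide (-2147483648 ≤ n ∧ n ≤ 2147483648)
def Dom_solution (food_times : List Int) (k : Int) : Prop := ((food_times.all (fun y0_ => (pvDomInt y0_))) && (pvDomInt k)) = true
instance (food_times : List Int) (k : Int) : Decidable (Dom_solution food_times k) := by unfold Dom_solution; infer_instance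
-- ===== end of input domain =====

-- B replaces A's heap simulation (consuming foods one by one in time order) by a binary
-- search over integer time values for the stopping level, with costs computed by direct
-- counting and no heap or sorting; alternative algorithm, similar cost.

-- ===== PORT A =====
-- heapq is not in PySem: the heap is ported as the list of its elements. heappush appends and
-- heappop removes the first lexicographically-least tuple (Python's tuple order); this is exact
-- because A observes the heap only through its minimum heap[0], the pop order, and a full sort
-- by index — all determined by the element multiset.  Fuel = number of remaining iterations
-- (each pop removes one element; one extra step for the returning iteration).
def solutionGo (heap : List (Int × Int)) (length previous_time k : Int) : Nat → Int
  | 0 => 0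
  | fuel + 1 =>
    match PySem.List.min? heap (fun p => toLex p) with
    | none => 0  -- 'while heap' exhausted: Python A returns None here (outside Pre_solution)
    | some m =>
      let t := (m.1 - previous_time) * length
      if t ≤ k then
        solutionGo (heap.erase m) (length - 1) m.1 (k - t) fuel
      else
        let index := PySem.Int.mod k length
        -- heap.sort(key=lambda x: x[1]); heap[index][1] — index is in range (0 ≤ k % length < length
        -- = heap length by the loop invariant), so the .getD default is never read
        ((PySem.List.pyGet? (PySem.List.sorted heap Prod.snd false) index).getD (0, 0)).2

def solution (food_times : List Int) (k : Int) : Int :=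
  if food_times.sum ≤ k then -1
  else
    let heap := (PySem.List.pyRange 0 (food_times.length : Int) 1).foldl
      (fun h i => h ++ [(PySem.List.pyGetD food_times i 0, i + 1)]) []
    solutionGo heap (food_times.length : Int) 0 k (food_times.length + 1)

-- ===== PORT B =====
-- sum(min(f, T) for f in food_times)
def sumMinB (ft : List Int) (T : Int) : Int := (ft.map (fun f => min f T)).sum

-- the while-loop 'while hi - lo > 1' as well-founded recursion on (hi - lo); returns (lo, hi)
def bsearchGo (ft : List Int) (k lo hi : Int) : Int × Int :=
  if 1 < hi - lo then
    let mid := PySem.Int.floordiv (lo + hi) 2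
    if k < sumMinB ft mid then bsearchGo ft k lo mid
    else bsearchGo ft k mid hi
  else (lo, hi)
termination_by (hi - lo).toNat
decreasing_by
  · have h2 := PySem.Int.floordiv_eq_ediv_of_pos (a := lo + hi) (b := 2) (by omega)
    omega
  · have h2 := PySem.Int.floordiv_eq_ediv_of_pos (a := lo + hi) (b := 2) (by omega)
    omega

def solution_alt (food_times : List Int) (k : Int) : Int :=
  if food_times.sum ≤ k then -1
  else
    let n : Int := (food_times.length : Int)
    -- min(food_times)/max(food_times) raise ValueError on []; this branch reaches [] only
    -- with k < 0, outside Pre_solution, so the .getD defaults are never read inside Pre_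
    let lo := min ((PySem.List.min? food_times (fun x => x)).getD 0) (PySem.Int.floordiv k n)
    let hi := (PySem.List.max? food_times (fun x => x)).getD 0
    let p := bsearchGo food_times k lo hi
    let rest := k - sumMinB food_times p.1
    let survivors := ((PySem.List.enumerate food_times 0).filter (fun q => p.2 ≤ q.2)).map
      (fun q => q.1 + 1)
    -- survivors[rest] — rest is in range (0 ≤ rest < len(survivors)), the default is never read
    (PySem.List.pyGet? survivors rest).getD 0

-- ===== PRECONDITION & SPEC =====
-- Pre_ excludes only the case food_times = [] with k < 0, where A falls off the while loop and
-- returns None, which is not an int (B raises ValueError on min([]) there).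
def Pre_solution (food_times : List Int) (k : Int) : Prop := ¬(food_times = [] ∧ k < 0)
instance (food_times : List Int) (k : Int) : Decidable (Pre_solution food_times k) := by
  unfold Pre_solution; infer_instance
def pvWitness_solution : List Int × Int := ([3, 1, 2], 5)

def Spec_solution (food_times : List Int) (k : Int) (out : Int) : Prop := out = solution_alt food_times k
instance (food_times : List Int) (k : Int) (out : Int) : Decidable (Spec_solution food_times k out) := by unfold Spec_solution; infer_instance

-- ===== CLAIM (what is proved, stated in full; the proofs are below) =====
def Claim_equal_solution : Prop := ∀ (food_times : List Int) (k : Int), Dom_solution food_times k → Pre_solution food_times k → Spec_solution food_times k (solution food_times k)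

-- ===== LEMMAS AND PROOFS =====

-- proof-internal reference: a single pointer walk over the lex-sorted (time, index) table;
-- A's heap loop is proved equal to it, and it in turn is proved equal to B's closed formula
def walkGo (s : List (Int × Int)) (prev k : Int) : Int :=
  match s with
  | [] => 0
  | (t, idx) :: rest =>
    let rem : Int := (((t, idx) :: rest).length : Int)
    let spend := (t - prev) * rem
    if spend ≤ k then walkGo rest t (k - spend)
    else
      ((PySem.List.pyGet? (PySem.List.sorted ((t, idx) :: rest) Prod.snd false)
        (PySem.Int.mod k rem)).getD (0, 0)).2

-- an insertion-sorted list with pairwise-distinct keys is strictly key-increasing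
lemma pv_pairwise_lt_sorted {α κ : Type} [LinearOrder κ] (xs : List α) (key : α → κ)
    (h : (xs.map key).Nodup) :
    (PySem.List.sorted xs key false).Pairwise (fun a b => key a < key b) := by
  have hle := PySem.List.sorted_pairwise xs key
  have hperm : ((PySem.List.sorted xs key false).map key).Perm (xs.map key) :=
    (PySem.List.sorted_perm xs key false).map key
  have hnd : ((PySem.List.sorted xs key false).map key).Nodup := (hperm.nodup_iff).2 h
  have hne : (PySem.List.sorted xs key false).Pairwise (fun a b => key a ≠ key b) :=
    List.pairwise_map.1 hnd
  exact (hle.and hne).imp (fun hab => lt_of_le_of_ne hab.1 hab.2)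

-- sorting is invariant under permutation when the keys are pairwise distinct
lemma pv_sorted_eq_of_perm {α κ : Type} [LinearOrder κ] (X Y : List α) (key : α → κ)
    (hp : X.Perm Y) (hn : (X.map key).Nodup) :
    PySem.List.sorted X key false = PySem.List.sorted Y key false := by
  apply PySem.List.sorted_eq_of_perm_of_pairwise_lt
  · exact (PySem.List.sorted_perm Y key false).trans hp.symm
  · exact pv_pairwise_lt_sorted Y key ((hp.map key).nodup_iff.1 hn)

-- the sorted list is the minimum followed by the sorted remainder (distinct elements)
lemma pv_sorted_cons_min (H : List (Int × Int)) (hnd : H.Nodup) (m : Int × Int)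
    (hm : PySem.List.min? H (fun p => toLex p) = some m) :
    PySem.List.sorted H (fun p => toLex p) false
      = m :: PySem.List.sorted (H.erase m) (fun p => toLex p) false := by
  have hmem : m ∈ H := PySem.List.min?_mem hm
  apply PySem.List.sorted_eq_of_perm_of_pairwise_lt
  · exact ((PySem.List.sorted_perm (H.erase m) _ false).cons m).trans
      (List.perm_cons_erase hmem).symm
  · rw [List.pairwise_cons]
    constructor
    · intro y hy
      have hyE : y ∈ H.erase m := (PySem.List.mem_sorted _ _ _ y).1 hy
      have hym : y ≠ m ∧ y ∈ H := (hnd.mem_erase_iff).1 hyE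
      have hle := PySem.List.min?_isMin hm y hym.2
      exact lt_of_le_of_ne hle (fun he => hym.1 (Equiv.injective toLex he.symm))
    · apply pv_pairwise_lt_sorted
      exact ((List.erase_sublist).map (fun p : Int × Int => toLex p)).nodup
        (hnd.map (Equiv.injective toLex))

-- heap loop = pointer walk over the lex-sorted table
lemma pv_go_eq : ∀ (n : Nat) (H : List (Int × Int)), H.length = n →
    ((H.map Prod.snd).Nodup) → ∀ prev k,
    solutionGo H (H.length : Int) prev k (H.length + 1)
      = walkGo (PySem.List.sorted H (fun p => toLex p) false) prev k := by
  intro n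
  induction n with
  | zero =>
    intro H hlen _ prev k
    have hH : H = [] := List.length_eq_zero_iff.1 hlen
    subst hH
    simp [solutionGo, walkGo, PySem.List.min?, PySem.List.sorted]
  | succ n ih =>
    intro H hlen hsnd prev k
    have hne : H ≠ [] := by intro h; subst h; simp at hlen
    have hndH : H.Nodup := hsnd.of_map
    obtain ⟨m, hm⟩ : ∃ m, PySem.List.min? H (fun p => toLex p) = some m := by
      cases hmin : PySem.List.min? H (fun p => toLex p) with
      | none => exact absurd ((PySem.List.min?_eq_none_iff H _).1 hmin) hne
      | some m => exact ⟨m, rfl⟩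
    have hmem : m ∈ H := PySem.List.min?_mem hm
    have hSort := pv_sorted_cons_min H hndH m hm
    have hlenE : (H.erase m).length = n := by
      rw [List.length_erase_of_mem hmem, hlen]; rfl
    have hlenS : (PySem.List.sorted (H.erase m) (fun p : Int × Int => toLex p) false).length = n := by
      rw [PySem.List.length_sorted, hlenE]
    rw [hlen, hSort]
    obtain ⟨t, idx⟩ := m
    show solutionGo H ((n + 1 : Nat) : Int) prev k (n + 1 + 1)
      = walkGo ((t, idx) :: _) prev k
    rw [solutionGo, hm]
    simp only [walkGo, List.length_cons, hlenS]
    have hcast : ((n + 1 : Nat) : Int) - 1 = ((n : Nat) : Int) := by push_cast; ring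
    rw [hcast]
    split
    · have hsndE : ((H.erase (t, idx)).map Prod.snd).Nodup :=
        (((List.erase_sublist (a := (t, idx)) (l := H))).map Prod.snd).nodup hsnd
      have := ih (H.erase (t, idx)) hlenE hsndE t (k - (t - prev) * ((n + 1 : Nat) : Int))
      rw [hlenE] at this
      exact this
    · have hperm : H.Perm ((t, idx) :: PySem.List.sorted (H.erase (t, idx)) (fun p : Int × Int => toLex p) false) := by
        rw [← hSort]; exact (PySem.List.sorted_perm H _ false).symm
      rw [pv_sorted_eq_of_perm H _ Prod.snd hperm hsnd]

-- sum of min over the pairs' first components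
def pvSsub (s : List (Int × Int)) (T : Int) : Int := (s.map (fun p => min p.1 T)).sum

lemma pv_S_mono (F : List Int) {T U : Int} (h : T ≤ U) : sumMinB F T ≤ sumMinB F U := by
  induction F with
  | nil => simp [sumMinB]
  | cons f r ih =>
    simp only [sumMinB, List.map_cons, List.sum_cons] at *
    exact add_le_add (min_le_min_left f h) ih

-- pvSsub of a list whose first components all dominate T is T * length
lemma pv_Ssub_const (s : List (Int × Int)) (T : Int) (h : ∀ p ∈ s, T ≤ p.1) :
    pvSsub s T = T * s.length := by
  induction s with
  | nil => simp [pvSsub]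
  | cons q r ih =>
    have h1 : min q.1 T = T := min_eq_right (h q List.mem_cons_self)
    have h2 := ih (fun p hp => h p (List.mem_cons_of_mem _ hp))
    simp only [pvSsub, List.map_cons, List.sum_cons, List.length_cons] at *
    rw [h1, h2]; push_cast; ring

lemma pv_Ssub_mono (s : List (Int × Int)) {T U : Int} (h : T ≤ U) : pvSsub s T ≤ pvSsub s U := by
  induction s with
  | nil => simp [pvSsub]
  | cons q r ih =>
    simp only [pvSsub, List.map_cons, List.sum_cons] at *
    exact add_le_add (min_le_min_left q.1 h) ih

-- THE WALK CHARACTERIZATION: if S(T-1) ≤ k < S(T) measured from the current state, the walk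
-- exits among the elements with time ≥ T and lands (k - S(T-1)) steps into the index order
lemma pv_walk (T : Int) : ∀ (s : List (Int × Int)) (prev kc : Int),
    s.Pairwise (fun a b => (fun p : Int × Int => toLex p) a ≤ (fun p : Int × Int => toLex p) b) →
    pvSsub s (T - 1) - prev * s.length ≤ kc →
    kc < pvSsub s T - prev * s.length →
    walkGo s prev kc
      = ((PySem.List.pyGet? (PySem.List.sorted (s.filter (fun p => T ≤ p.1)) Prod.snd false)
          (kc + prev * s.length - pvSsub s (T - 1))).getD (0, 0)).2 := by
  intro s
  induction s with
  | nil => intro prev kc _ h1 h2; simp [pvSsub] at h1 h2; omega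
  | cons q r ih =>
    intro prev kc hsort h1 h2
    obtain ⟨t, idx⟩ := q
    have hhead : ∀ p ∈ r, t ≤ p.1 := by
      intro p hp
      have hle := (List.pairwise_cons.1 hsort).1 p hp
      rcases lt_or_eq_of_le hle with h | h
      · rcases (Prod.Lex.toLex_lt_toLex).1 h with h | h
        · exact le_of_lt h
        · exact le_of_eq h.1
      · exact le_of_eq (congrArg Prod.fst (Equiv.injective toLex h))
    have hall : ∀ p ∈ (t, idx) :: r, t ≤ p.1 := by
      intro p hp
      rcases List.mem_cons.1 hp with h | h
      · exact le_of_eq (congrArg Prod.fst h.symm)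
      · exact hhead p h
    by_cases hcase : t < T
    · -- head is consumed: branch condition holds, recurse
      have hSt : pvSsub ((t, idx) :: r) t = t * (((t, idx) :: r).length : Int) :=
        pv_Ssub_const _ t hall
      have hmono : pvSsub ((t, idx) :: r) t ≤ pvSsub ((t, idx) :: r) (T - 1) :=
        pv_Ssub_mono _ (by omega)
      have hcond : (t - prev) * (((t, idx) :: r).length : Int) ≤ kc := by
        have : t * (((t, idx) :: r).length : Int) - prev * (((t, idx) :: r).length : Int) ≤ kc := by
          rw [← hSt]; omega
        linarith [this]
      -- the sub-sums of the tail
      have hsub1 : pvSsub r (T - 1) = pvSsub ((t, idx) :: r) (T - 1) - t := by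
        simp only [pvSsub, List.map_cons, List.sum_cons]
        have : min t (T - 1) = t := min_eq_left (by omega)
        rw [this]; ring
      have hsub2 : pvSsub r T = pvSsub ((t, idx) :: r) T - t := by
        simp only [pvSsub, List.map_cons, List.sum_cons]
        have : min t T = t := min_eq_left (by omega)
        rw [this]; ring
      have hfilter : ((t, idx) :: r).filter (fun p => decide (T ≤ p.1))
          = r.filter (fun p => decide (T ≤ p.1)) := by
        rw [List.filter_cons_of_neg]; simp; omega
      have hrec := ih t (kc - (t - prev) * (((t, idx) :: r).length : Int))
        ((List.pairwise_cons.1 hsort).2)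
        (by
          rw [hsub1]
          simp only [List.length_cons] at h1 ⊢
          push_cast at h1 ⊢
          linarith)
        (by
          rw [hsub2]
          simp only [List.length_cons] at h2 ⊢
          push_cast at h2 ⊢
          linarith)
      show walkGo ((t, idx) :: r) prev kc = _
      rw [walkGo]
      simp only [hcond, if_pos]
      rw [hrec, hfilter]
      have hidx : kc - (t - prev) * (((t, idx) :: r).length : Int) + t * (r.length : Int)
          - pvSsub r (T - 1)
          = kc + prev * (((t, idx) :: r).length : Int) - pvSsub ((t, idx) :: r) (T - 1) := by
        rw [hsub1]; simp only [List.length_cons]; push_cast; ring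
      rw [hidx]
    · -- head has time ≥ T: the walk returns here
      have hT : T ≤ t := by omega
      have hallT : ∀ p ∈ (t, idx) :: r, T ≤ p.1 := fun p hp => le_trans hT (hall p hp)
      have hS1 : pvSsub ((t, idx) :: r) (T - 1) = (T - 1) * (((t, idx) :: r).length : Int) :=
        pv_Ssub_const _ _ (fun p hp => by have := hallT p hp; omega)
      have hS2 : pvSsub ((t, idx) :: r) T = T * (((t, idx) :: r).length : Int) :=
        pv_Ssub_const _ _ hallT
      have hfilter : ((t, idx) :: r).filter (fun p => decide (T ≤ p.1)) = (t, idx) :: r :=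
        List.filter_eq_self.2 (fun p hp => decide_eq_true (hallT p hp))
      have hLpos : (0 : Int) < (((t, idx) :: r).length : Int) := by
        simp
      have hcond : ¬ (t - prev) * (((t, idx) :: r).length : Int) ≤ kc := by
        intro hc
        have ht' : T * (((t, idx) :: r).length : Int) ≤ t * (((t, idx) :: r).length : Int) :=
          mul_le_mul_of_nonneg_right hT (by omega)
        linarith [h2, hS2, ht', hc]
      -- the exit index: kc % rem equals kc + prev*rem - (T-1)*rem, which lies in [0, rem)
      have hrest0 : 0 ≤ kc + prev * (((t, idx) :: r).length : Int)
          - pvSsub ((t, idx) :: r) (T - 1) := by linarith [h1]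
      have hrest1 : kc + prev * (((t, idx) :: r).length : Int)
          - pvSsub ((t, idx) :: r) (T - 1) < (((t, idx) :: r).length : Int) := by
        rw [hS1]
        rw [hS2] at h2
        linarith [h2]
      have hmod : PySem.Int.mod kc (((t, idx) :: r).length : Int)
          = kc + prev * (((t, idx) :: r).length : Int) - pvSsub ((t, idx) :: r) (T - 1) := by
        rw [PySem.Int.mod_eq_emod_of_pos hLpos]
        set L : Int := (((t, idx) :: r).length : Int) with hLdef
        set rest : Int := kc + prev * L - pvSsub ((t, idx) :: r) (T - 1) with hrest
        have hkc : kc = rest + (pvSsub ((t, idx) :: r) (T - 1) - prev * L) := by ring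
        rw [hkc, hS1]
        have : rest + ((T - 1) * L - prev * L) = rest + L * (T - 1 - prev) := by ring
        rw [this, Int.add_mul_emod_self_left]
        exact Int.emod_eq_of_lt hrest0 hrest1
      show walkGo ((t, idx) :: r) prev kc = _
      rw [walkGo]
      simp only [hcond, if_neg, not_false_iff]
      rw [hmod, hfilter]

-- binary-search correctness: from a bracket lo < hi with S(lo) ≤ k < S(hi), the loop returns
-- adjacent bounds with the same bracket property
lemma pv_bsearch (F : List Int) (k : Int) : ∀ (n : Nat) (lo hi : Int), (hi - lo).toNat ≤ n →
    lo < hi → sumMinB F lo ≤ k → k < sumMinB F hi →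
    (bsearchGo F k lo hi).2 = (bsearchGo F k lo hi).1 + 1 ∧
    sumMinB F (bsearchGo F k lo hi).1 ≤ k ∧ k < sumMinB F (bsearchGo F k lo hi).2 := by
  intro n
  induction n with
  | zero => intro lo hi hn hlt _ _; omega
  | succ n ih =>
    intro lo hi hn hlt hlo hhi
    rw [bsearchGo]
    by_cases hgap : 1 < hi - lo
    · rw [if_pos hgap]
      have hdiv := PySem.Int.floordiv_eq_ediv_of_pos (a := lo + hi) (b := 2) (by omega)
      set mid := PySem.Int.floordiv (lo + hi) 2 with hmid
      have hmidlo : lo < mid := by omega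
      have hmidhi : mid < hi := by omega
      by_cases hcmp : k < sumMinB F mid
      · rw [if_pos hcmp]
        exact ih lo mid (by omega) hmidlo hlo hcmp
      · rw [if_neg hcmp]
        exact ih mid hi (by omega) hmidhi (by omega) hhi
    · rw [if_neg hgap]
      refine ⟨by simp; omega, by simpa using hlo, by simpa using hhi⟩

-- pyGet? commutes with map
lemma pv_pyGet?_map {α β : Type} (g : α → β) (l : List α) (i : Int) :
    PySem.List.pyGet? (l.map g) i = (PySem.List.pyGet? l i).map g := by
  simp only [PySem.List.pyGet?, PySem.List.pyIdx?, List.length_map]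
  split
  · simp
  · split
    · simp
    · simp

-- pvSsub over the (value, index+1) pairs of F is sumMinB over F
lemma pv_Ssub_pairs (F : List Int) (T : Int) :
    pvSsub ((PySem.List.pyRange 0 (F.length : Int) 1).map
      (fun i => (PySem.List.pyGetD F i 0, i + 1))) T = sumMinB F T := by
  unfold pvSsub sumMinB
  rw [List.map_map]
  have : ((fun p : Int × Int => min p.1 T) ∘ fun i => (PySem.List.pyGetD F i 0, i + 1))
      = (fun v => min v T) ∘ (fun i => PySem.List.pyGetD F i 0) := by
    funext i; rfl
  rw [this, ← List.map_map, PySem.List.map_pyGetD_pyRange_zero']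

-- sums over maps are invariant under permutation
lemma pv_Ssub_perm {s s' : List (Int × Int)} (h : s.Perm s') (T : Int) :
    pvSsub s T = pvSsub s' T := (h.map _).sum_eq

-- ===== VERDICT (by name: the statement is the Claim_ definition above) =====
theorem solution_spec : Claim_equal_solution := by
  intro food_times k _hdom hpre
  unfold Spec_solution solution solution_alt
  by_cases hsum : food_times.sum ≤ k
  · rw [if_pos hsum, if_pos hsum]
  · rw [if_neg hsum, if_neg hsum]
    have hne : food_times ≠ [] := by
      intro h; subst h
      simp at hsum
      exact hpre ⟨rfl, by omega⟩
    -- name the pieces of B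
    set n : Int := (food_times.length : Int) with hn
    have hnpos : 0 < n := by
      rw [hn]; have := List.length_pos_iff.2 hne; exact_mod_cast this
    obtain ⟨mn, hmn⟩ : ∃ m, PySem.List.min? food_times (fun x => x) = some m := by
      cases h : PySem.List.min? food_times (fun x => x) with
      | none => exact absurd ((PySem.List.min?_eq_none_iff _ _).1 h) hne
      | some m => exact ⟨m, rfl⟩
    obtain ⟨mx, hmx⟩ : ∃ m, PySem.List.max? food_times (fun x => x) = some m := by
      cases h : PySem.List.max? food_times (fun x => x) with
      | none => exact absurd ((PySem.List.max?_eq_none_iff _ _).1 h) hne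
      | some m => exact ⟨m, rfl⟩
    set lo0 : Int := min ((PySem.List.min? food_times (fun x => x)).getD 0)
      (PySem.Int.floordiv k n) with hlo0
    set hi0 : Int := (PySem.List.max? food_times (fun x => x)).getD 0 with hhi0
    have hminall : ∀ f ∈ food_times, lo0 ≤ f := by
      intro f hf
      have := PySem.List.min?_isMin hmn f hf
      rw [hlo0, hmn]; simp only [Option.getD_some]
      exact le_trans (min_le_left _ _) this
    -- S(lo0) ≤ k
    have hSlo : sumMinB food_times lo0 ≤ k := by
      have hconst : sumMinB food_times lo0 = lo0 * n := by
        have := pv_Ssub_const (food_times.map (fun f => (f, 0))) lo0 (by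
          intro p hp
          obtain ⟨f, hf, rfl⟩ := List.mem_map.1 hp
          exact hminall f hf)
        unfold pvSsub at this
        rw [List.map_map] at this
        unfold sumMinB
        simpa [hn] using this
      rw [hconst]
      have hfd := PySem.Int.floordiv_mul_add_mod k n
      have hmod := PySem.Int.mod_nonneg (a := k) hnpos
      have hlo0le : lo0 ≤ PySem.Int.floordiv k n := by rw [hlo0]; exact min_le_right _ _
      nlinarith [mul_le_mul_of_nonneg_right hlo0le (le_of_lt hnpos)]
    -- k < S(hi0) = sum
    have hShi : k < sumMinB food_times hi0 := by
      have heq : sumMinB food_times hi0 = food_times.sum := by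
        unfold sumMinB
        have hmap : List.map (fun f => min f hi0) food_times = List.map id food_times := by
          apply List.map_congr_left
          intro f hf
          have := PySem.List.max?_isMax hmx f hf
          rw [hhi0, hmx]; simp only [Option.getD_some, id]
          exact min_eq_left this
        rw [hmap, List.map_id]
      omega
    have hlohi : lo0 < hi0 := by
      by_contra h
      have := pv_S_mono food_times (le_of_not_gt h)
      omega
    obtain ⟨hadj, hplo, hphi⟩ := pv_bsearch food_times k (hi0 - lo0).toNat lo0 hi0 le_rfl
      hlohi hSlo hShi
    set p := bsearchGo food_times k lo0 hi0 with hp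
    set T : Int := p.2 with hT
    have hT1 : p.1 = T - 1 := by omega
    -- the A side: heap loop = walk over the lex-sorted pair table = the closed formula
    simp only [PySem.List.foldl_append_singleton_eq_map, List.nil_append]
    set pairs := (PySem.List.pyRange 0 (food_times.length : Int) 1).map
      (fun i => (PySem.List.pyGetD food_times i 0, i + 1)) with hpairs
    have hlenpairs : pairs.length = food_times.length := by
      rw [hpairs, List.length_map, PySem.List.length_pyRange_one]; omega
    have hsndnd : (pairs.map Prod.snd).Nodup := by
      rw [hpairs, List.map_map]
      have : (Prod.snd ∘ fun i : Int => (PySem.List.pyGetD food_times i 0, i + 1))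
          = fun i : Int => i + 1 := by funext i; rfl
      rw [this]
      exact (PySem.List.nodup_pyRange_one 0 (food_times.length : Int)).map (fun a b h => by omega)
    have hgo := pv_go_eq pairs.length pairs rfl hsndnd 0 k
    rw [hlenpairs] at hgo
    rw [hgo]
    set S0 := PySem.List.sorted pairs (fun p : Int × Int => toLex p) false with hS0
    have hS0perm : S0.Perm pairs := PySem.List.sorted_perm _ _ _
    have hS0len : (S0.length : Int) = n := by
      rw [PySem.List.length_sorted, hlenpairs, hn]
    have hSsub1 : pvSsub S0 (T - 1) = sumMinB food_times (T - 1) := by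
      rw [pv_Ssub_perm hS0perm, hpairs, pv_Ssub_pairs]
    have hSsub2 : pvSsub S0 T = sumMinB food_times T := by
      rw [pv_Ssub_perm hS0perm, hpairs, pv_Ssub_pairs]
    have hwalk := pv_walk T S0 0 k (PySem.List.sorted_pairwise pairs _)
      (by rw [hSsub1]; rw [hT1] at hplo; omega)
      (by rw [hSsub2]; omega)
    rw [hwalk]
    -- identify the sorted filtered table with B's survivor list
    set E := (PySem.List.enumerate food_times 0).filter
      (fun q : Int × Int => decide (T ≤ q.2)) with hE
    have hpairsE : pairs = (PySem.List.enumerate food_times 0).map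
        (fun q : Int × Int => (q.2, q.1 + 1)) := by
      rw [hpairs, PySem.List.enumerate_eq_map_pyRange (d := 0), List.map_map]
      rfl
    have hfilterE : pairs.filter (fun p : Int × Int => decide (T ≤ p.1))
        = E.map (fun q : Int × Int => (q.2, q.1 + 1)) := by
      rw [hpairsE, List.filter_map, hE]
      rfl
    have hsorted : PySem.List.sorted (S0.filter (fun p : Int × Int => decide (T ≤ p.1)))
        Prod.snd false = E.map (fun q : Int × Int => (q.2, q.1 + 1)) := by
      apply PySem.List.sorted_eq_of_perm_of_pairwise_lt
      · rw [← hfilterE]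
        exact (hS0perm.filter _).symm
      · have henum : (PySem.List.enumerate food_times 0).Pairwise
            (fun a b : Int × Int => a.1 < b.1) := PySem.List.pairwise_lt_enumerate _ _
        have hEpw : E.Pairwise (fun a b : Int × Int => a.1 < b.1) := henum.filter _
        rw [List.pairwise_map]
        exact hEpw.imp (fun h => by omega)
    rw [hsorted]
    -- both sides read position rest of E, one through pairs, one through indices
    have hidx : k + 0 * (S0.length : Int) - pvSsub S0 (T - 1)
        = k - sumMinB food_times p.1 := by
      rw [hSsub1, hT1]; ring
    rw [hidx, pv_pyGet?_map, pv_pyGet?_map]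
    cases PySem.List.pyGet? E (k - sumMinB food_times p.1) with
    | none => rfl
    | some q => rfl
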